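-- pv_equiv track=rewrite | github.com/zeyh/AI-course-projects | Alphadoku_Puzzle_Solver.py | gridgen
-- ===== SOURCE A (Python) =====
-- LEN = 5  # lenth of the grid
--
-- def gridgen(size):
--     '''
--     param:
--         an int indicate the length of the square matrix
--     return:
--         a 2d matrix each grid labeled with number from 1 - length of the square matrix
--     eg: size = 4
--     output:
--         11 11 22 22
--         11 11 22 22
--         33 33 44 44
--         33 33 44 44
--     '''
--     out = []
--     for i in range(int(size/LEN)):
--         for r in range(LEN):
--             out1 = []
--             for j in range(int(size/LEN)):
--                 out1 = out1 + [i*LEN+j+1]*LEN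
--             out.append(out1)
--
--     return out
-- ===== SOURCE B (Python) =====
-- LEN = 5  # lenth of the grid
--
-- def gridgen(size):
--     n = int(size / LEN)
--     return [[(r // LEN) * LEN + (c // LEN) + 1 for c in range(n * LEN)]
--             for r in range(n * LEN)]
-- ===== Notes on version B (the rewrite author's own statement) =====
-- stated objective: simpler
-- what changed: Replaces the triple loop that rebuilds each row LEN times from concatenated [label]*LEN chunks with a direct per-cell coordinate formula (r//LEN)*LEN + (c//LEN) + 1 over a flat double comprehension.
import Mathlib
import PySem

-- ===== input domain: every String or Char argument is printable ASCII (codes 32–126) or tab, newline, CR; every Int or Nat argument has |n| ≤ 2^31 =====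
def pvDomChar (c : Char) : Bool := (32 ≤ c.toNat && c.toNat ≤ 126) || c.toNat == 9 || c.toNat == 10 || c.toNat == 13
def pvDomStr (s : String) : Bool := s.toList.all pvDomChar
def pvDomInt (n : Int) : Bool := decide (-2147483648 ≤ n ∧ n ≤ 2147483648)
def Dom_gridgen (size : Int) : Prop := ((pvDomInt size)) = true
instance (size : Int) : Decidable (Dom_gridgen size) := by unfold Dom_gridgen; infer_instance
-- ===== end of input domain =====

-- B replaces A's triple loop (each row rebuilt by concatenating [label]*LEN chunks, and
-- appended LEN times) with a direct per-cell formula in a flat double comprehension; objective: simpler.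

-- ===== PORT A =====
-- int(size/LEN) is Python's truncating division toward zero; ported as Int.tdiv, which is
-- exact for |size| ≤ 2^31 (the float quotient's rounding cannot cross an integer there).
def gridgen (size : Int) : List (List Int) :=
  (PySem.List.pyRange 0 (size.tdiv 5) 1).foldl (fun out i =>
    (PySem.List.pyRange 0 5 1).foldl (fun out _r =>
      out ++ [(PySem.List.pyRange 0 (size.tdiv 5) 1).foldl (fun out1 j =>
        out1 ++ List.replicate 5 (i * 5 + j + 1)) []]) out) []

-- ===== PORT B =====
def gridgen_alt (size : Int) : List (List Int) :=
  let n := size.tdiv 5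
  (PySem.List.pyRange 0 (n * 5) 1).map (fun r =>
    (PySem.List.pyRange 0 (n * 5) 1).map (fun c =>
      PySem.Int.floordiv r 5 * 5 + PySem.Int.floordiv c 5 + 1))

-- ===== PRECONDITION & SPEC =====
def Spec_gridgen (size : Int) (out : List (List Int)) : Prop := out = gridgen_alt size
instance (size : Int) (out : List (List Int)) : Decidable (Spec_gridgen size out) := by unfold Spec_gridgen; infer_instance

-- ===== CLAIM (what is proved, stated in full; the proofs are below) =====
def Claim_equal_gridgen : Prop := ∀ (size : Int), Dom_gridgen size → Spec_gridgen size (gridgen size)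

-- ===== LEMMAS AND PROOFS =====

-- range(0, m*5) splits into m consecutive blocks of 5
theorem pv_block_split (m : Nat) :
    PySem.List.pyRange 0 ((m : Int) * 5) 1
      = (PySem.List.pyRange 0 (m : Int) 1).flatMap
          (fun i => PySem.List.pyRange (i * 5) (i * 5 + 5) 1) := by
  induction m with
  | zero => simp [PySem.List.pyRange_one_eq_nil]
  | succ k ih =>
    push_cast
    rw [show ((k:Int) + 1) * 5 = (k:Int)*5 + 5 by ring,
        PySem.List.pyRange_one_append 0 ((k:Int)*5) ((k:Int)*5+5) (by positivity) (by omega),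
        PySem.List.pyRange_one_succ_right (by positivity : (0:Int) ≤ (k:Int)),
        List.flatMap_append]
    rw [ih]
    simp

-- r // 5 is constant (= i) on the block [i*5, i*5+5)
theorem pv_fdiv_block (i r : Int) (h1 : i * 5 ≤ r) (h2 : r < i * 5 + 5) :
    PySem.Int.floordiv r 5 = i := by
  rw [PySem.Int.floordiv_eq_iff_of_pos (by norm_num)]
  omega

-- B's row (mapped over the block-decomposed column range) equals A's row built from chunks
theorem pv_row (i : Int) (m : Nat) :
    ((PySem.List.pyRange 0 (m:Int) 1).flatMap
        (fun b => PySem.List.pyRange (b * 5) (b * 5 + 5) 1)).map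
        (fun c => i * 5 + PySem.Int.floordiv c 5 + 1)
      = (PySem.List.pyRange 0 (m:Int) 1).flatMap
          (fun j => List.replicate 5 (i * 5 + j + 1)) := by
  rw [List.map_flatMap]
  refine List.flatMap_congr (fun j _ => ?_)
  rw [List.map_congr_left (fun c hc => by
        rw [pv_fdiv_block j c (PySem.List.mem_pyRange_one.mp hc).1
              (by have := (PySem.List.mem_pyRange_one.mp hc).2; omega)]),
      List.map_const', PySem.List.length_pyRange_one]
  congr 1
  omega

-- the core equality, generic in n = size // 5 (truncated)
theorem pv_core (n : Int) :
    (PySem.List.pyRange 0 n 1).foldl (fun out i =>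
      (PySem.List.pyRange 0 5 1).foldl (fun out _r =>
        out ++ [(PySem.List.pyRange 0 n 1).foldl (fun out1 j =>
          out1 ++ List.replicate 5 (i * 5 + j + 1)) []]) out) []
    = (PySem.List.pyRange 0 (n * 5) 1).map (fun r =>
        (PySem.List.pyRange 0 (n * 5) 1).map (fun c =>
          PySem.Int.floordiv r 5 * 5 + PySem.Int.floordiv c 5 + 1)) := by
  simp only [PySem.List.foldl_append_eq_flatMap, List.nil_append]
  by_cases hn : n ≤ 0
  · rw [PySem.List.pyRange_one_eq_nil hn, PySem.List.pyRange_one_eq_nil (by nlinarith : n*5 ≤ 0)]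
    simp
  · lift n to ℕ using (by omega : (0:Int) ≤ n) with m
    rw [pv_block_split m, List.map_flatMap]
    refine List.flatMap_congr (fun i _ => ?_)
    rw [List.map_congr_left (fun r hr => by
          rw [pv_fdiv_block i r (PySem.List.mem_pyRange_one.mp hr).1
                (by have := (PySem.List.mem_pyRange_one.mp hr).2; omega)]),
        List.map_const', PySem.List.length_pyRange_one,
        show i*5+5-i*5 = 5 by ring]
    rw [pv_row i m]
    norm_num [show PySem.List.pyRange 0 5 1 = [0,1,2,3,4] from by decide, List.flatMap,
      List.replicate_succ]
    rfl

-- ===== VERDICT (by name: the statement is the Claim_ definition above) =====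
theorem gridgen_spec : Claim_equal_gridgen := by
  intro size _
  unfold Spec_gridgen gridgen gridgen_alt
  exact pv_core (size.tdiv 5)
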